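-- pv_equiv track=rewrite | github.com/amunozUOW/QVAF | analysis_agent.py | count_confidence_levels
-- ===== SOURCE A (Python) =====
-- def count_confidence_levels(results):
--     """Count questions by AI confidence level"""
--     levels = {'high': 0, 'medium': 0, 'low': 0}
--     high_conf_incorrect = 0
--
--     for r in results:
--         # Check baseline confidence
--         conf = r.get('confidence_without_rag', 0) or 0
--         if conf >= 80:
--             levels['high'] += 1
--             if not r.get('correct_without_rag'):
--                 high_conf_incorrect += 1
--         elif conf >= 50:
--             levels['medium'] += 1
--         else:
--             levels['low'] += 1
--
--     return levels, high_conf_incorrect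
-- ===== SOURCE B (Python) =====
-- def count_confidence_levels(results):
--     """Count questions by AI confidence level (bucket-per-pass version)"""
--     results = list(results)
--
--     def conf(r):
--         return r.get('confidence_without_rag', 0) or 0
--
--     levels = {
--         'high': sum(1 for r in results if conf(r) >= 80),
--         'medium': sum(1 for r in results if 50 <= conf(r) < 80),
--         'low': sum(1 for r in results if conf(r) < 50),
--     }
--     high_conf_incorrect = sum(
--         1 for r in results if conf(r) >= 80 and not r.get('correct_without_rag')
--     )
--     return levels, high_conf_incorrect
-- ===== Notes on version B (the rewrite author's own statement) =====
-- stated objective: alternative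
-- what changed: Replaced A's single fused fold that mutates a dict and two counters with four independent counting passes (one countP-style filter per bucket and one for high-confidence-incorrect), building the result dict once at the end.
import Mathlib
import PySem

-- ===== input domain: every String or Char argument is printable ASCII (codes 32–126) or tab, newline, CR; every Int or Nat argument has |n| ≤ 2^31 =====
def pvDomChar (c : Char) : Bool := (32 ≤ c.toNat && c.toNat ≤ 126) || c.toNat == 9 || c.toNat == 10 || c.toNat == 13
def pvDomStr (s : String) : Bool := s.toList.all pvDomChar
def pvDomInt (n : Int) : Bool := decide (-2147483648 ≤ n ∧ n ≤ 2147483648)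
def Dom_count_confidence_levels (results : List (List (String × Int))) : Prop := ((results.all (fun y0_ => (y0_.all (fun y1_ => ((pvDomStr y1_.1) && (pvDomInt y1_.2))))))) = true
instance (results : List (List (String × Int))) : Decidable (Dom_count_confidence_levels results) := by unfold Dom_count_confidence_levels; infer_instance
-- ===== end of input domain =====

-- B replaces A's single fused fold (dict mutation + two counters) by one independent
-- counting pass per bucket; alternative decomposition, same O(n) cost.

-- ===== PORT A =====
-- conf = r.get('confidence_without_rag', 0) or 0   (int truthiness: 0 stays 0)
def cclConf (r : List (String × Int)) : Int :=
  let conf0 := (PySem.Dict.mk r).getD "confidence_without_rag" 0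
  if conf0 == 0 then 0 else conf0

-- not r.get('correct_without_rag'): None and 0 are falsy
def cclNotCorrect (r : List (String × Int)) : Bool :=
  match (PySem.Dict.mk r).get? "correct_without_rag" with
  | none => true
  | some v => v == 0

-- one body of A's for-loop: updates (levels, high_conf_incorrect)
def cclStepA (st : PySem.Dict String Int × Int) (r : List (String × Int)) :
    PySem.Dict String Int × Int :=
  let conf := cclConf r
  if conf ≥ 80 then
    (st.1.modify "high" 0 (· + 1), if cclNotCorrect r then st.2 + 1 else st.2)
  else if conf ≥ 50 then (st.1.modify "medium" 0 (· + 1), st.2)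
  else (st.1.modify "low" 0 (· + 1), st.2)

def count_confidence_levels (results : List (List (String × Int))) : (List (String × Int)) × Int :=
  let init : PySem.Dict String Int × Int :=
    (PySem.Dict.ofList [("high", 0), ("medium", 0), ("low", 0)], 0)
  let st := results.foldl cclStepA init
  (st.1.items, st.2)

-- ===== PORT B =====
def count_confidence_levels_alt (results : List (List (String × Int))) : (List (String × Int)) × Int :=
  let high : Int := results.countP (fun r => decide (cclConf r ≥ 80))
  let medium : Int := results.countP (fun r => decide (50 ≤ cclConf r ∧ cclConf r < 80))
  let low : Int := results.countP (fun r => decide (cclConf r < 50))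
  let hci : Int := results.countP (fun r => decide (cclConf r ≥ 80) && cclNotCorrect r)
  ([("high", high), ("medium", medium), ("low", low)], hci)

-- ===== PRECONDITION & SPEC =====
def Spec_count_confidence_levels (results : List (List (String × Int))) (out : (List (String × Int)) × Int) : Prop := out = count_confidence_levels_alt results
instance (results : List (List (String × Int))) (out : (List (String × Int)) × Int) : Decidable (Spec_count_confidence_levels results out) := by unfold Spec_count_confidence_levels; infer_instance

-- ===== CLAIM (what is proved, stated in full; the proofs are below) =====
def Claim_equal_count_confidence_levels : Prop := ∀ (results : List (List (String × Int))), Dom_count_confidence_levels results → Spec_count_confidence_levels results (count_confidence_levels results)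

-- ===== LEMMAS AND PROOFS =====

lemma cclModHigh (h m l : Int) :
    (PySem.Dict.mk [("high", h), ("medium", m), ("low", l)]).modify "high" 0 (· + 1)
      = PySem.Dict.mk [("high", h + 1), ("medium", m), ("low", l)] := by
  simp [PySem.Dict.modify, PySem.Dict.insert, PySem.Dict.getD, PySem.Dict.get?]

lemma cclModMed (h m l : Int) :
    (PySem.Dict.mk [("high", h), ("medium", m), ("low", l)]).modify "medium" 0 (· + 1)
      = PySem.Dict.mk [("high", h), ("medium", m + 1), ("low", l)] := by
  simp [PySem.Dict.modify, PySem.Dict.insert, PySem.Dict.getD, PySem.Dict.get?]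

lemma cclModLow (h m l : Int) :
    (PySem.Dict.mk [("high", h), ("medium", m), ("low", l)]).modify "low" 0 (· + 1)
      = PySem.Dict.mk [("high", h), ("medium", m), ("low", l + 1)] := by
  simp [PySem.Dict.modify, PySem.Dict.insert, PySem.Dict.getD, PySem.Dict.get?]

-- loop invariant: A's fold starting from counters (h, m, l, c) adds B's bucket counts
lemma cclLoop (rs : List (List (String × Int))) (h m l c : Int) :
    rs.foldl cclStepA (PySem.Dict.mk [("high", h), ("medium", m), ("low", l)], c)
      = (PySem.Dict.mk
          [("high", h + (rs.countP (fun r => decide (cclConf r ≥ 80)) : Int)),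
           ("medium", m + (rs.countP (fun r => decide (50 ≤ cclConf r ∧ cclConf r < 80)) : Int)),
           ("low", l + (rs.countP (fun r => decide (cclConf r < 50)) : Int))],
         c + (rs.countP (fun r => decide (cclConf r ≥ 80) && cclNotCorrect r) : Int)) := by
  induction rs generalizing h m l c with
  | nil => simp
  | cons r rs ih =>
    simp only [List.foldl_cons, List.countP_cons, cclStepA]
    by_cases h80 : cclConf r ≥ 80
    · have d80 : decide (cclConf r ≥ 80) = true := by simpa using h80
      have dm : decide (50 ≤ cclConf r ∧ cclConf r < 80) = false := by simp; omega
      have dl : decide (cclConf r < 50) = false := by simp; omega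
      rw [if_pos h80, cclModHigh]
      by_cases hnc : cclNotCorrect r = true
      · rw [if_pos hnc, ih]
        simp [d80, dm, dl, hnc]
        all_goals omega
      · have hnc' : cclNotCorrect r = false := by simpa using hnc
        rw [if_neg (by simp [hnc']), ih]
        simp [d80, dm, dl, hnc']
        all_goals omega
    · by_cases h50 : cclConf r ≥ 50
      · have d80 : decide (cclConf r ≥ 80) = false := by simpa using h80
        have dm : decide (50 ≤ cclConf r ∧ cclConf r < 80) = true := by simp [h50]; omega
        have dl : decide (cclConf r < 50) = false := by simp; omega
        rw [if_neg h80, if_pos h50, cclModMed, ih]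
        simp [d80, dm, dl]
        all_goals omega
      · have d80 : decide (cclConf r ≥ 80) = false := by simpa using h80
        have dm : decide (50 ≤ cclConf r ∧ cclConf r < 80) = false := by simp; omega
        have dl : decide (cclConf r < 50) = true := by simp; omega
        rw [if_neg h80, if_neg h50, cclModLow, ih]
        simp [d80, dm, dl]
        all_goals omega

-- ===== VERDICT (by name: the statement is the Claim_ definition above) =====
theorem count_confidence_levels_spec : Claim_equal_count_confidence_levels := by
  intro results _
  show _ = _
  unfold count_confidence_levels count_confidence_levels_alt
  have hinit : (PySem.Dict.ofList [("high", (0:Int)), ("medium", 0), ("low", 0)])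
      = PySem.Dict.mk [("high", 0), ("medium", 0), ("low", 0)] := by decide
  simp only [hinit, cclLoop]
  simp
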